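-- pv_equiv track=rewrite | github.com/Mac84do/missdorking | scraper.py | _detect_google_block
-- ===== SOURCE A (Python) =====
-- def _detect_google_block(response_text):
--     """Detect if Google is blocking or showing captcha"""
--     block_indicators = [
--         'captcha',
--         'unusual traffic',
--         'automated queries',
--         'blocked',
--         'verify you are human',
--         'our systems have detected unusual traffic',
--         'sorry, but your computer or network',
--         'distil_r_blocked',
--         'access denied'
--     ]
--
--     text_lower = response_text.lower()
--     for indicator in block_indicators:
--         if indicator in text_lower:
--             return True
--     return False
-- ===== SOURCE B (Python) =====
-- _PATTERNS = [
--     'captcha',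
--     'unusual traffic',
--     'automated queries',
--     'blocked',
--     'verify you are human',
--     'our systems have detected unusual traffic',
--     'sorry, but your computer or network',
--     'distil_r_blocked',
--     'access denied',
-- ]
--
-- def _detect_google_block(response_text):
--     """Detect if Google is blocking or showing captcha"""
--     # Single left-to-right pass: simulate the multi-pattern NFA, carrying the
--     # set of partially matched pattern suffixes still alive at this position.
--     active = []
--     for ch in response_text.lower():
--         nxt = []
--         for rem in active + _PATTERNS:
--             if rem and rem[0] == ch:
--                 if len(rem) == 1:
--                     return True
--                 nxt.append(rem[1:])
--         active = nxt
--     return False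
-- ===== Notes on version B (the rewrite author's own statement) =====
-- stated objective: alternative
-- what changed: Replaces A's nine sequential whole-text substring scans with one left-to-right pass that simulates a multi-pattern NFA, carrying the set of partially matched pattern suffixes as an explicit accumulator.
import Mathlib
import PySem

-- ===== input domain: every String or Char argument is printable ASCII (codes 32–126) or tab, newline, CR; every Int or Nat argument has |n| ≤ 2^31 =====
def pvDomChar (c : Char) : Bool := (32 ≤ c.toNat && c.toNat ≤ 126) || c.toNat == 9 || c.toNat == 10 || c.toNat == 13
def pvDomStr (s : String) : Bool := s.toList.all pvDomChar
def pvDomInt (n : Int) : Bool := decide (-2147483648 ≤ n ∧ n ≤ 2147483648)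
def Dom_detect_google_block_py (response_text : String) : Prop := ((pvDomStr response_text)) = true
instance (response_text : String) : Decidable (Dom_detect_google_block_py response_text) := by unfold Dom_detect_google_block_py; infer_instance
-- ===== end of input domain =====

-- B replaces A's nine sequential whole-text substring scans with one left-to-right pass that
-- simulates a multi-pattern NFA (explicit set of live partial matches) — objective: alternative.

-- ===== PORT A =====
-- A's literal indicator list
def pvIndicatorsA : List String :=
  ["captcha",
   "unusual traffic",
   "automated queries",
   "blocked",
   "verify you are human",
   "our systems have detected unusual traffic",
   "sorry, but your computer or network",
   "distil_r_blocked",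
   "access denied"]

-- the for-loop with early return
def pvLoopA : List String → String → Bool
  | [], _ => false
  | ind :: rest, t => if PySem.Str.isIn ind t then true else pvLoopA rest t

def detect_google_block_py (response_text : String) : Bool :=
  pvLoopA pvIndicatorsA (PySem.Str.lower response_text)

-- ===== PORT B =====
-- B's pattern list, as character lists
def pvPatternsB : List (List Char) :=
  ["captcha".toList,
   "unusual traffic".toList,
   "automated queries".toList,
   "blocked".toList,
   "verify you are human".toList,
   "our systems have detected unusual traffic".toList,
   "sorry, but your computer or network".toList,
   "distil_r_blocked".toList,
   "access denied".toList]

-- inner loop: 'for rem in active + _PATTERNS: …' with early return on a completed match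
def pvAdvance (c : Char) : List (List Char) → Bool × List (List Char)
  | [] => (false, [])
  | rem :: rest =>
      match rem with
      | [] => pvAdvance c rest            -- 'if rem' fails
      | d :: ds =>
          if d = c then
            if ds = [] then (true, [])    -- 'return True' (state after is irrelevant)
            else
              let r := pvAdvance c rest
              (r.1, ds :: r.2)            -- 'nxt.append(rem[1:])'
          else pvAdvance c rest

-- outer loop: 'for ch in text: …', threading the active-suffix set
def pvRunB (pats : List (List Char)) : List Char → List (List Char) → Bool
  | [], _ => false
  | c :: cs, active =>
      let r := pvAdvance c (active ++ pats)
      if r.1 then true else pvRunB pats cs r.2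

def detect_google_block_py_alt (response_text : String) : Bool :=
  pvRunB pvPatternsB (PySem.Str.lower response_text).toList []

-- ===== PRECONDITION & SPEC =====
def Spec_detect_google_block_py (response_text : String) (out : Bool) : Prop := out = detect_google_block_py_alt response_text
instance (response_text : String) (out : Bool) : Decidable (Spec_detect_google_block_py response_text out) := by unfold Spec_detect_google_block_py; infer_instance

-- ===== CLAIM (what is proved, stated in full; the proofs are below) =====
def Claim_equal_detect_google_block_py : Prop := ∀ (response_text : String), Dom_detect_google_block_py response_text → Spec_detect_google_block_py response_text (detect_google_block_py response_text)

-- ===== LEMMAS AND PROOFS =====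

-- the char each live suffix must advance on
def pvStepF (c : Char) : List Char → Option (List Char)
  | [] => none
  | d :: ds => if d = c then some ds else none

lemma pvAdvance_fst_true (c : Char) (L : List (List Char)) (h : [c] ∈ L) :
    (pvAdvance c L).1 = true := by
  induction L with
  | nil => simp at h
  | cons rem rest ih =>
      rcases List.mem_cons.mp h with h1 | h1
      · subst h1
        simp [pvAdvance]
      · cases rem with
        | nil => simpa [pvAdvance] using ih h1
        | cons d ds =>
            by_cases hd : d = c
            · by_cases hds : ds = []
              · simp [pvAdvance, hd, hds]
              · simpa [pvAdvance, hd, hds] using ih h1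
            · simpa [pvAdvance, hd] using ih h1

lemma pvAdvance_eq (c : Char) (L : List (List Char)) (h : [c] ∉ L) :
    pvAdvance c L = (false, L.filterMap (pvStepF c)) := by
  induction L with
  | nil => simp [pvAdvance]
  | cons rem rest ih =>
      have hrest : [c] ∉ rest := fun hm => h (List.mem_cons_of_mem _ hm)
      cases rem with
      | nil => simpa [pvAdvance, pvStepF] using ih hrest
      | cons d ds =>
          by_cases hd : d = c
          · have hds : ds ≠ [] := by
              intro hn; exact h (by simp [hd, hn])
            simp [pvAdvance, hd, hds, pvStepF, ih hrest]
          · simp [pvAdvance, hd, pvStepF, ih hrest]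

-- the loop invariant: B returns true iff a live suffix completes or some pattern occurs later
lemma pvRunB_iff (pats : List (List Char)) (cs : List Char) :
    ∀ active : List (List Char), pvRunB pats cs active = true ↔
      (∃ rem ∈ active, rem ≠ [] ∧ rem <+: cs) ∨ (∃ p ∈ pats, p ≠ [] ∧ p <:+: cs) := by
  induction cs with
  | nil =>
      intro active
      simp [pvRunB]
  | cons c cs ih =>
      intro active
      by_cases hc : [c] ∈ active ++ pats
      · have : pvRunB pats (c :: cs) active = true := by
          simp [pvRunB, pvAdvance_fst_true c _ hc]
        rw [this]
        simp only [List.mem_append] at hc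
        constructor
        · intro _
          rcases hc with hc | hc
          · exact Or.inl ⟨[c], hc, by simp, by simp⟩
          · exact Or.inr ⟨[c], hc, by simp, List.infix_cons_iff.mpr (Or.inl (by simp))⟩
        · intro _; rfl
      · rw [show pvRunB pats (c :: cs) active
              = pvRunB pats cs ((active ++ pats).filterMap (pvStepF c)) by
            simp [pvRunB, pvAdvance_eq c _ hc]]
        rw [ih]
        constructor
        · rintro (⟨rem, hrem, hne, hpre⟩ | hp)
          · rcases List.mem_filterMap.mp hrem with ⟨orig, horig, hstep⟩
            cases orig with
            | nil => simp [pvStepF] at hstep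
            | cons d ds =>
                obtain ⟨hd, hds⟩ : d = c ∧ ds = rem := by
                  by_cases h : d = c
                  · exact ⟨h, by simpa [pvStepF, h] using hstep⟩
                  · simp [pvStepF, h] at hstep
                subst hd; subst hds
                rcases List.mem_append.mp horig with h | h
                · exact Or.inl ⟨d :: ds, h, by simp, by simpa using hpre⟩
                · exact Or.inr ⟨d :: ds, h, by simp,
                    List.infix_cons_iff.mpr (Or.inl (by simpa using hpre))⟩
          · rcases hp with ⟨p, hp, hne, hinf⟩
            exact Or.inr ⟨p, hp, hne, hinf.trans (List.suffix_cons c cs).isInfix⟩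
        · rintro (⟨rem, hrem, hne, hpre⟩ | ⟨p, hp, hne, hinf⟩)
          · cases rem with
            | nil => exact absurd rfl hne
            | cons d ds =>
                rcases (List.cons_prefix_cons.mp hpre) with ⟨hd, hds⟩
                subst hd
                have hds' : ds ≠ [] := by
                  intro hn; subst hn; exact hc (List.mem_append.mpr (Or.inl hrem))
                exact Or.inl ⟨ds, List.mem_filterMap.mpr
                  ⟨d :: ds, List.mem_append.mpr (Or.inl hrem), by simp [pvStepF]⟩, hds', hds⟩
          · rcases List.infix_cons_iff.mp hinf with hpre | hinf'
            · cases p with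
              | nil => exact absurd rfl hne
              | cons d ds =>
                  rcases (List.cons_prefix_cons.mp hpre) with ⟨hd, hds⟩
                  subst hd
                  have hds' : ds ≠ [] := by
                    intro hn; subst hn; exact hc (List.mem_append.mpr (Or.inr hp))
                  exact Or.inl ⟨ds, List.mem_filterMap.mpr
                    ⟨d :: ds, List.mem_append.mpr (Or.inr hp), by simp [pvStepF]⟩, hds', hds⟩
            · exact Or.inr ⟨p, hp, hne, hinf'⟩

-- VERDICT
theorem detect_google_block_py_spec : Claim_equal_detect_google_block_py := by
  intro s _
  unfold Spec_detect_google_block_py detect_google_block_py detect_google_block_py_alt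
  refine Bool.eq_iff_iff.mpr ?_
  rw [pvRunB_iff]
  simp only [pvLoopA, pvIndicatorsA, pvPatternsB, Bool.if_true_left, Bool.or_eq_true,
    PySem.Str.isIn_iff_infix]
  simp
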